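-- pv_equiv track=rewrite | github.com/alexxvives/AI_jobapplications3 | backend/scrapers/workday/workday_scraper.py | extract_workday_experience_level
-- ===== SOURCE A (Python) =====
-- def extract_workday_experience_level(title: str) -> str:
--     """Extract standardized experience level from Workday job title (Entry Level, Mid, Senior, Lead)"""
--     title_lower = title.lower()
--
--     # Senior level indicators
--     if any(term in title_lower for term in ['senior', 'sr.', 'sr ']):
--         return 'Senior'
--     # Leadership level indicators
--     elif any(term in title_lower for term in ['lead', 'principal', 'staff', 'director', 'manager', 'head of', 'vp', 'vice president']):
--         return 'Lead'
--     # Entry level indicators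
--     elif any(term in title_lower for term in ['junior', 'jr.', 'jr ', 'entry', 'associate', 'graduate', 'new grad', 'intern', 'student']):
--         return 'Entry Level'
--     else:
--         return 'Mid'
-- ===== SOURCE B (Python) =====
-- # Single pass over a flat keyword->priority table, keeping the maximum priority
-- # matched, then mapping the priority to its level name.
-- KEYWORD_PRIORITY = [
--     ('senior', 3), ('sr.', 3), ('sr ', 3),
--     ('lead', 2), ('principal', 2), ('staff', 2), ('director', 2),
--     ('manager', 2), ('head of', 2), ('vp', 2), ('vice president', 2),
--     ('junior', 1), ('jr.', 1), ('jr ', 1), ('entry', 1), ('associate', 1),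
--     ('graduate', 1), ('new grad', 1), ('intern', 1), ('student', 1),
-- ]
-- LEVEL_NAMES = {3: 'Senior', 2: 'Lead', 1: 'Entry Level', 0: 'Mid'}
--
-- def extract_workday_experience_level(title: str) -> str:
--     t = title.lower()
--     best = 0
--     for kw, p in KEYWORD_PRIORITY:
--         if p > best and kw in t:
--             best = p
--     return LEVEL_NAMES[best]
-- ===== Notes on version B (the rewrite author's own statement) =====
-- stated objective: alternative
-- what changed: Instead of an if/elif chain of any()-checks per level, B makes one pass over a flat keyword-to-priority table accumulating the maximum matched priority and maps that priority to the level name; correctness follows because the priorities mirror the chain's precedence (Senior=3 > Lead=2 > Entry=1, default 0=Mid).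
import Mathlib
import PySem

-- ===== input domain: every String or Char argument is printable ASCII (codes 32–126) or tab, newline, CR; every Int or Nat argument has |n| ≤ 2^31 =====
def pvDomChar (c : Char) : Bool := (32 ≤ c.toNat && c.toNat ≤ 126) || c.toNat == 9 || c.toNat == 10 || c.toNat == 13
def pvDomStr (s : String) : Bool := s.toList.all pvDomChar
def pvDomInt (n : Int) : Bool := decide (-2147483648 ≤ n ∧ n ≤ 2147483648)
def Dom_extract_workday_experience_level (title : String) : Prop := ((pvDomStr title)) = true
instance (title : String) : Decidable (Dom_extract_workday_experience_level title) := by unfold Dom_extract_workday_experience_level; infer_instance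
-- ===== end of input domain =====

-- B replaces the if/elif chain with one pass over a flat keyword→priority table keeping the maximum matched priority (alternative decomposition, same behaviour).

-- ===== PORT A =====
def extract_workday_experience_level (title : String) : String :=
  let title_lower := PySem.Str.lower title
  if ["senior", "sr.", "sr "].any (fun term => PySem.Str.isIn term title_lower) then
    "Senior"
  else if ["lead", "principal", "staff", "director", "manager", "head of", "vp", "vice president"].any (fun term => PySem.Str.isIn term title_lower) then
    "Lead"
  else if ["junior", "jr.", "jr ", "entry", "associate", "graduate", "new grad", "intern", "student"].any (fun term => PySem.Str.isIn term title_lower) then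
    "Entry Level"
  else
    "Mid"

-- ===== PORT B =====
def pvKeywordPriority : List (String × Int) :=
  [("senior", 3), ("sr.", 3), ("sr ", 3),
   ("lead", 2), ("principal", 2), ("staff", 2), ("director", 2),
   ("manager", 2), ("head of", 2), ("vp", 2), ("vice president", 2),
   ("junior", 1), ("jr.", 1), ("jr ", 1), ("entry", 1), ("associate", 1),
   ("graduate", 1), ("new grad", 1), ("intern", 1), ("student", 1)]

def pvLevelNames : PySem.Dict Int String :=
  PySem.Dict.ofList [(3, "Senior"), (2, "Lead"), (1, "Entry Level"), (0, "Mid")]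

def extract_workday_experience_level_alt (title : String) : String :=
  let t := PySem.Str.lower title
  let best := pvKeywordPriority.foldl
    (fun best kp => if kp.2 > best && PySem.Str.isIn kp.1 t then kp.2 else best) 0
  -- LEVEL_NAMES[best]: best is always a key of the dict, so getD's default is never used
  PySem.Dict.getD pvLevelNames best ""

-- ===== PRECONDITION & SPEC =====
def Spec_extract_workday_experience_level (title : String) (out : String) : Prop := out = extract_workday_experience_level_alt title
instance (title : String) (out : String) : Decidable (Spec_extract_workday_experience_level title out) := by unfold Spec_extract_workday_experience_level; infer_instance

-- ===== CLAIM (what is proved, stated in full; the proofs are below) =====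
def Claim_equal_extract_workday_experience_level : Prop := ∀ (title : String), Dom_extract_workday_experience_level title → Spec_extract_workday_experience_level title (extract_workday_experience_level title)

-- ===== LEMMAS AND PROOFS =====

-- folding one priority-p section of the table: the accumulator becomes p iff some
-- keyword of the section matches and p is larger than the accumulator
lemma pv_fold_section (t : String) (p : Int) (ws : List String) (acc : Int) :
    (ws.map (·, p)).foldl
      (fun best kp => if kp.2 > best && PySem.Str.isIn kp.1 t then kp.2 else best) acc
      = if (ws.any (fun term => PySem.Str.isIn term t)) && decide (p > acc) then p else acc := by
  induction ws generalizing acc with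
  | nil => simp
  | cons w rest ih =>
    simp only [List.map_cons, List.foldl_cons, List.any_cons]
    rw [ih]
    by_cases hw : PySem.Str.isIn w t = true
    all_goals by_cases hp : p > acc
    all_goals by_cases hr : rest.any (fun term => PySem.Str.isIn term t) = true
    all_goals simp_all
    split_ifs <;> omega

lemma pv_table_split :
    pvKeywordPriority =
      (["senior", "sr.", "sr "].map (·, (3 : Int))) ++
      (["lead", "principal", "staff", "director", "manager", "head of", "vp", "vice president"].map (·, (2 : Int))) ++
      (["junior", "jr.", "jr ", "entry", "associate", "graduate", "new grad", "intern", "student"].map (·, (1 : Int))) := rfl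

-- ===== VERDICT (by name: the statement is the Claim_ definition above) =====
theorem extract_workday_experience_level_spec : Claim_equal_extract_workday_experience_level := by
  intro title _
  unfold Spec_extract_workday_experience_level extract_workday_experience_level extract_workday_experience_level_alt
  simp only [pv_table_split, List.foldl_append, pv_fold_section]
  generalize (["senior", "sr.", "sr "].any (fun term => PySem.Str.isIn term (PySem.Str.lower title))) = a
  generalize (["lead", "principal", "staff", "director", "manager", "head of", "vp", "vice president"].any (fun term => PySem.Str.isIn term (PySem.Str.lower title))) = b
  generalize (["junior", "jr.", "jr ", "entry", "associate", "graduate", "new grad", "intern", "student"].any (fun term => PySem.Str.isIn term (PySem.Str.lower title))) = c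
  cases a <;> cases b <;> cases c <;> rfl
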